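-- pv_equiv track=rewrite | github.com/loschmidt/vae-dehalogenases | notebooks/minimal_version/evolution_protocols/profiler.py | query_indels_and_substitution
-- ===== SOURCE A (Python) =====
-- from typing import Dict, List, Tuple
--
-- def query_indels_and_substitution(seq: str, query: str) -> Tuple[List[str], List[str]]:
--     """
--     Find the position in sequence where insertion, deletion or substitution happened against query in MSA
--     :param seq: sequence to be examined
--     :param query: sequence against which the metrics are calculated (MSA query typically)
--     :return: tuple of lists containing substitutions and indels in formatted string
--     """
--     """ Determines how many indels were added to WT and these positions keep in list """
--     indels_list = []
--     substitution_list = []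
--     gaps_vec = [p != '-' for p in query]
--     wt_positions = [sum(gaps_vec[:prefix + 1]) for prefix in range(len(query))]
--     for pos, (seq_char, query_char) in enumerate(zip(seq, query)):
--         if seq_char != query_char:
--             if query_char == '-':
--                 indels_list.append("ins{}{}".format(wt_positions[pos], seq_char))
--             elif seq_char == '-':
--                 indels_list.append("del{}{}".format(wt_positions[pos], query_char))
--             else:  # Substitution occurs
--                 substitution_list.append("{}{}{}".format(query_char, wt_positions[pos], seq_char))
--     return substitution_list, indels_list
-- ===== SOURCE B (Python) =====
-- def query_indels_and_substitution(seq, query):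
--     substitution_list = []
--     indels_list = []
--     wt = 0  # running count of non-gap query positions up to and including current
--     for seq_char, query_char in zip(seq, query):
--         if query_char != '-':
--             wt += 1
--         if seq_char != query_char:
--             if query_char == '-':
--                 indels_list.append("ins{}{}".format(wt, seq_char))
--             elif seq_char == '-':
--                 indels_list.append("del{}{}".format(wt, query_char))
--             else:
--                 substitution_list.append("{}{}{}".format(query_char, wt, seq_char))
--     return substitution_list, indels_list
-- ===== Notes on version B (the rewrite author's own statement) =====
-- stated objective: faster
-- what changed: Replaces the quadratic wt_positions table (re-summing a prefix slice for every position) by a single running counter maintained in one pass over the zipped sequences.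
import Mathlib
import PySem

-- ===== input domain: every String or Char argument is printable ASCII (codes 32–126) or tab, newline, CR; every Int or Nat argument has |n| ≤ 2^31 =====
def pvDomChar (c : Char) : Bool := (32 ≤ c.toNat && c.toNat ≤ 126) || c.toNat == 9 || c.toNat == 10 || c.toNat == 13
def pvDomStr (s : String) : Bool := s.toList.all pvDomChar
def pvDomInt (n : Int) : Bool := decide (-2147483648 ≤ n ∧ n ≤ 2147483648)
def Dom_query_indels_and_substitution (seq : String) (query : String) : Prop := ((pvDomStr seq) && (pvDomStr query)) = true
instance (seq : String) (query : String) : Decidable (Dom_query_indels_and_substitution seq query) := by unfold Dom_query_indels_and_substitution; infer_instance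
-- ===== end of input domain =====

-- B replaces A's quadratic wt_positions table (a prefix re-sum per position) with a single
-- running counter in one pass; proved to return exactly A's value on all inputs.


-- ===== PORT A =====
-- sum(gaps_vec[:prefix+1]) : Python sums a list of bools (True = 1) into an int
def pvSumBools (l : List Bool) : Int := l.foldl (fun acc b => acc + if b then 1 else 0) 0

-- the loop 'for pos, (seq_char, query_char) in enumerate(zip(seq, query)): …' with its two
-- accumulating lists; wt_positions[pos] is always in range (pos < len(zip) ≤ len(query)),
-- so the getD default 0 is never used
def pvLoopA (wt : List Int) (pos : Nat) (pairs : List (Char × Char))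
    (subs indels : List String) : List String × List String :=
  match pairs with
  | [] => (subs, indels)
  | (s, q) :: rest =>
    if s ≠ q then
      if q = '-' then
        pvLoopA wt (pos + 1) rest subs
          (indels ++ ["ins" ++ PySem.Int.toStr (wt.getD pos 0) ++ String.ofList [s]])
      else if s = '-' then
        pvLoopA wt (pos + 1) rest subs
          (indels ++ ["del" ++ PySem.Int.toStr (wt.getD pos 0) ++ String.ofList [q]])
      else
        pvLoopA wt (pos + 1) rest
          (subs ++ [String.ofList [q] ++ PySem.Int.toStr (wt.getD pos 0) ++ String.ofList [s]]) indels
    else pvLoopA wt (pos + 1) rest subs indels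

def query_indels_and_substitution (seq : String) (query : String) : List String × List String :=
  let gaps_vec : List Bool := query.toList.map (fun p => p != '-')
  let wt_positions : List Int :=
    (List.range query.toList.length).map
      (fun pfx : Nat => pvSumBools (PySem.List.slice gaps_vec none (some ((pfx : Int) + 1))))
  pvLoopA wt_positions 0 (seq.toList.zip query.toList) [] []

-- ===== PORT B =====
-- one pass: wt is the running count of non-gap query chars up to and including the current column
def pvLoopB (wt : Int) (pairs : List (Char × Char))
    (subs indels : List String) : List String × List String :=
  match pairs with
  | [] => (subs, indels)
  | (s, q) :: rest =>
    let wt' := if q ≠ '-' then wt + 1 else wt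
    if s ≠ q then
      if q = '-' then
        pvLoopB wt' rest subs (indels ++ ["ins" ++ PySem.Int.toStr wt' ++ String.ofList [s]])
      else if s = '-' then
        pvLoopB wt' rest subs (indels ++ ["del" ++ PySem.Int.toStr wt' ++ String.ofList [q]])
      else
        pvLoopB wt' rest (subs ++ [String.ofList [q] ++ PySem.Int.toStr wt' ++ String.ofList [s]]) indels
    else pvLoopB wt' rest subs indels

def query_indels_and_substitution_alt (seq : String) (query : String) : List String × List String :=
  pvLoopB 0 (seq.toList.zip query.toList) [] []

-- ===== PRECONDITION & SPEC =====
def Spec_query_indels_and_substitution (seq : String) (query : String) (out : List String × List String) : Prop := out = query_indels_and_substitution_alt seq query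
instance (seq : String) (query : String) (out : List String × List String) : Decidable (Spec_query_indels_and_substitution seq query out) := by unfold Spec_query_indels_and_substitution; infer_instance

-- ===== CLAIM (what is proved, stated in full; the proofs are below) =====
def Claim_equal_query_indels_and_substitution : Prop := ∀ (seq : String) (query : String), Dom_query_indels_and_substitution seq query → Spec_query_indels_and_substitution seq query (query_indels_and_substitution seq query)

-- ===== LEMMAS AND PROOFS =====

-- count of non-gap chars, the value B's running counter tracks
def pvCnt : List Char → Int
  | [] => 0
  | c :: r => (if c ≠ '-' then 1 else 0) + pvCnt r

theorem pvSumBools_foldl (l : List Char) (a : Int) :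
    (l.map (fun p => p != '-')).foldl (fun acc b => acc + if b then 1 else 0) a
      = a + pvCnt l := by
  induction l generalizing a with
  | nil => simp [pvCnt]
  | cons c r ih =>
    simp only [List.map_cons, List.foldl_cons, pvCnt, ih, bne_iff_ne]
    ring

theorem pvSumBools_map (l : List Char) :
    pvSumBools (l.map (fun p => p != '-')) = pvCnt l := by
  simpa using pvSumBools_foldl l 0

theorem pvLoop_eq (s q : List Char) (wt : List Int) (pos : Nat) (w : Int)
    (subs indels : List String)
    (h : ∀ k, k < q.length → wt.getD (pos + k) 0 = w + pvCnt (q.take (k + 1))) :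
    pvLoopA wt pos (s.zip q) subs indels = pvLoopB w (s.zip q) subs indels := by
  induction s generalizing q pos w subs indels with
  | nil => simp [pvLoopA, pvLoopB]
  | cons a s' ih =>
    cases q with
    | nil => simp [pvLoopA, pvLoopB]
    | cons b q' =>
      have hw : wt.getD pos 0 = (if b ≠ '-' then w + 1 else w) := by
        have := h 0 (by simp)
        simp only [Nat.add_zero, List.take_succ_cons, List.take_zero, pvCnt] at this
        rw [this]; split <;> ring
      have h' : ∀ k, k < q'.length →
          wt.getD (pos + 1 + k) 0 = (if b ≠ '-' then w + 1 else w) + pvCnt (q'.take (k + 1)) := by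
        intro k hk
        have := h (k + 1) (by simpa using Nat.succ_lt_succ hk)
        rw [show pos + (k + 1) = pos + 1 + k by omega] at this
        simp only [List.take_succ_cons, pvCnt] at this
        rw [this]; split <;> ring
      show pvLoopA wt pos ((a, b) :: s'.zip q') subs indels
          = pvLoopB w ((a, b) :: s'.zip q') subs indels
      rw [pvLoopA, pvLoopB]
      by_cases hb : b = '-' <;> simp only [hb, ne_eq, not_true, not_false_iff, if_true, if_false] at hw h' ⊢ <;>
        simp only [hw] <;> split_ifs <;> exact ih q' (pos + 1) _ _ _ h'

theorem pvWt_getD (q : List Char) (k : Nat) (hk : k < q.length) :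
    ((List.range q.length).map
        (fun pfx : Nat => pvSumBools (PySem.List.slice (q.map (fun p => p != '-')) none (some ((pfx : Int) + 1))))).getD k 0
      = pvCnt (q.take (k + 1)) := by
  rw [PySem.List.getD_map_range _ _ _ _ hk]
  have : ((k : Int) + 1) = ((k + 1 : Nat) : Int) := by push_cast; ring
  rw [this, PySem.List.slice_to_natCast, ← List.map_take, pvSumBools_map]

-- ===== VERDICT (by name: the statement is the Claim_ definition above) =====
theorem query_indels_and_substitution_spec : Claim_equal_query_indels_and_substitution := by
  intro seq query _
  unfold Spec_query_indels_and_substitution query_indels_and_substitution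
    query_indels_and_substitution_alt
  refine pvLoop_eq seq.toList query.toList _ 0 0 [] [] ?_
  intro k hk
  rw [Nat.zero_add, zero_add]
  exact pvWt_getD query.toList k hk
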